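-- pv_equiv track=rewrite | github.com/vidstige/aoc | 2018/20.py | search
-- ===== SOURCE A (Python) =====
-- directions = {
--     'E': (2, 0, '|'),
--     'W': (-2, 0, '|'),
--     'N': (0, -2, '-'),
--     'S': (0, 2, '-')
-- }
--
-- def search(regexp):
--     grid = {}
--     stack = []
--     p = 0, 0
--     for c in regexp:
--         grid[p] = '.'
--         if c in directions:
--             dx, dy, door = directions[c]
--             x, y = p
--             grid[(x + dx // 2, y + dy // 2)] = door
--             p = x + dx, y + dy
--         if c == '(':
--             stack.append(p)
--         if c == '|':
--             p = stack[-1]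
--         if c == ')':
--             p = stack.pop()
--
--     return grid
-- ===== SOURCE B (Python) =====
-- directions = {
--     'E': (2, 0, '|'),
--     'W': (-2, 0, '|'),
--     'N': (0, -2, '-'),
--     'S': (0, 2, '-')
-- }
--
-- def search(regexp):
--     # Recursive-descent over the string with a shared index; groups recurse
--     # instead of keeping an explicit position stack.
--     grid = {}
--     n = len(regexp)
--
--     def parse(i, p):
--         """Consume characters from index i with current position p until this
--         level's closing bracket or the end of the string; return the index
--         just after."""
--         start = p
--         while i < n:
--             c = regexp[i]
--             grid[p] = '.'
--             i += 1
--             if c in directions: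
--                 dx, dy, door = directions[c]
--                 x, y = p
--                 grid[(x + dx // 2, y + dy // 2)] = door
--                 p = (x + dx, y + dy)
--             elif c == '(':
--                 i = parse(i, p)
--             elif c == '|':
--                 p = start
--             elif c == ')':
--                 return i
--         return i
--
--     parse(0, (0, 0))
--     return grid
-- ===== Notes on version B (the rewrite author's own statement) =====
-- stated objective: alternative
-- what changed: A's single loop with an explicit stack of positions is replaced by a recursive-descent parser over the string: each parenthesised group is handled by one recursive call that returns the index just past the group, and an alternative separator resets to the call's start position, so no stack is maintained.
-- outside the precondition, e.g. on search('|'): A raises IndexError, B returns {(0, 0): '.'}; on search(')'): A raises IndexError, B returns {(0, 0): '.'}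
import Mathlib
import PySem

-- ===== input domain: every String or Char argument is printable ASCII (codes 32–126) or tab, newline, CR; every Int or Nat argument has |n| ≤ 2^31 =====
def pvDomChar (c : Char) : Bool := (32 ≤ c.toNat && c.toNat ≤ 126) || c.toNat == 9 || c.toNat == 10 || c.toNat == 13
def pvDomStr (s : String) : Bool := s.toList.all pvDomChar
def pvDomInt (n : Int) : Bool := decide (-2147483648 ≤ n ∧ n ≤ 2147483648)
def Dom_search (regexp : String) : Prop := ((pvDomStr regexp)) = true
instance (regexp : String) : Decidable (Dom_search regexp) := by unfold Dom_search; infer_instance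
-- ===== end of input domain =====

-- B replaces A's explicit position stack by a recursive-descent parser (one recursive call per
-- parenthesised group, with alternatives restarting from the group's start position); same cost,
-- different decomposition (objective: alternative).

-- ===== PORT A =====
def directionsA : PySem.Dict Char (Int × Int × String) :=
  PySem.Dict.ofList [('E', (2, 0, "|")), ('W', (-2, 0, "|")), ('N', (0, -2, "-")), ('S', (0, 2, "-"))]

-- the direction update of A's loop body: grid[p] = '.', then the door mark and the move
def stepDir (c : Char) (grid : PySem.Dict (Int × Int) String) (p : Int × Int) :
    PySem.Dict (Int × Int) String × (Int × Int) :=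
  let grid := grid.insert p "."
  match directionsA.get? c with
  | some (dx, dy, door) =>
      (grid.insert (p.1 + PySem.Int.floordiv dx 2, p.2 + PySem.Int.floordiv dy 2) door,
       (p.1 + dx, p.2 + dy))
  | none => (grid, p)

-- the stack update of A's loop body (push on open, peek on alternative, pop on close); none = IndexError
def stepCtl (c : Char) (grid : PySem.Dict (Int × Int) String) (stack : List (Int × Int))
    (p : Int × Int) :
    Option (PySem.Dict (Int × Int) String × List (Int × Int) × (Int × Int)) :=
  if c = '(' then some (grid, stack ++ [p], p)
  else if c = '|' then (PySem.List.pyGet? stack (-1)).map (fun q => (grid, stack, q))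
  else if c = ')' then (PySem.List.pop? stack (-1)).map (fun r => (grid, r.2, r.1))
  else some (grid, stack, p)

-- A's for-loop over the characters
def runA : List Char →
    PySem.Dict (Int × Int) String × List (Int × Int) × (Int × Int) →
    Option (PySem.Dict (Int × Int) String × List (Int × Int) × (Int × Int))
  | [], st => some st
  | c :: cs, (grid, stack, p) =>
    match stepCtl c (stepDir c grid p).1 stack (stepDir c grid p).2 with
    | some st => runA cs st
    | none => none

def search (regexp : String) : List (Int × Int × String) :=
  match runA regexp.toList (PySem.Dict.empty, [], (0, 0)) with
  | some (grid, _, _) => grid.items.map (fun kv => (kv.1.1, kv.1.2, kv.2))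
  | none => []

-- ===== PORT B =====
-- Source B's parse(i, p): consume characters until this level's closing bracket or the end; 'start'
-- is the position the level began at (alternatives reset to it); returns (rest of string, grid).
-- The fuel argument only makes the recursion structural; 2*len+1 is always enough.
def parseAlt : Nat → List Char → (Int × Int) → (Int × Int) →
    PySem.Dict (Int × Int) String → List Char × PySem.Dict (Int × Int) String
  | 0, cs, _, _, grid => (cs, grid)
  | _ + 1, [], _, _, grid => ([], grid)
  | f + 1, c :: cs, start, p, grid =>
    let grid := grid.insert p "."
    match directionsA.get? c with
    | some (dx, dy, door) =>
        parseAlt f cs start (p.1 + dx, p.2 + dy)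
          (grid.insert (p.1 + PySem.Int.floordiv dx 2, p.2 + PySem.Int.floordiv dy 2) door)
    | none =>
      if c = '(' then
        match parseAlt f cs p p grid with
        | (rest, grid) => parseAlt f rest start p grid
      else if c = '|' then parseAlt f cs start start grid
      else if c = ')' then (cs, grid)
      else parseAlt f cs start p grid

def search_alt (regexp : String) : List (Int × Int × String) :=
  let cs := regexp.toList
  (parseAlt (2 * cs.length + 1) cs (0, 0) (0, 0) PySem.Dict.empty).2.items.map
    (fun kv => (kv.1.1, kv.1.2, kv.2))

-- ===== PRECONDITION & SPEC =====
-- Pre_ excludes exactly the strings with a '|' or ')' at nesting depth 0 (an alternative or a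
-- close with empty stack), on which the Python A raises IndexError.
def Pre_search (regexp : String) : Prop :=
  ∀ i, i < regexp.toList.length →
    (regexp.toList.getD i ' ' = '|' ∨ regexp.toList.getD i ' ' = ')') →
    (regexp.toList.take i).count ')' < (regexp.toList.take i).count '('
instance (regexp : String) : Decidable (Pre_search regexp) := by unfold Pre_search; infer_instance

def pvWitness_search : String := "NE(W|S(N|))EE"

def Spec_search (regexp : String) (out : List (Int × Int × String)) : Prop := out = search_alt regexp
instance (regexp : String) (out : List (Int × Int × String)) : Decidable (Spec_search regexp out) := by unfold Spec_search; infer_instance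

-- ===== CLAIM (what is proved, stated in full; the proofs are below) =====
def Claim_equal_search : Prop := ∀ (regexp : String), Dom_search regexp → Pre_search regexp → Spec_search regexp (search regexp)

-- ===== LEMMAS AND PROOFS =====

-- A's state never raises while the bracket count stays positive at every '|'/')'
theorem runA_total (cs : List Char) :
    ∀ (stack : List (Int × Int)) (grid : PySem.Dict (Int × Int) String) (p : Int × Int),
    (∀ i, i < cs.length → (cs.getD i ' ' = '|' ∨ cs.getD i ' ' = ')') →
      (cs.take i).count ')' < (cs.take i).count '(' + stack.length) →
    ∃ st, runA cs (grid, stack, p) = some st := by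
  induction cs with
  | nil => intro stack grid p _; exact ⟨_, rfl⟩
  | cons c cs ih =>
    intro stack grid p h
    by_cases hc1 : c = '('
    · subst hc1
      have hd : directionsA.get? '(' = none := by decide
      have hrun : runA ('(' :: cs) (grid, stack, p)
          = runA cs ((stepDir '(' grid p).1, stack ++ [p], p) := by
        simp [runA, stepCtl, stepDir, hd]
      rw [hrun]
      apply ih
      intro i hi hcj
      have := h (i + 1) (by simpa using hi) (by simpa using hcj)
      simp at this ⊢
      omega
    · by_cases hc2 : c = '|'
      · subst hc2
        have h0 := h 0 (by simp) (by simp)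
        simp at h0
        rcases stack.eq_nil_or_concat with rfl | ⟨L, b, hLb⟩
        · simp at h0
        · rw [List.concat_eq_append] at hLb
          subst hLb
          have hd : directionsA.get? '|' = none := by decide
          have hrun : runA ('|' :: cs) (grid, L ++ [b], p) = runA cs ((stepDir '|' grid p).1, L ++ [b], b) := by
            simp [runA, stepCtl, stepDir, hd, pysem]
          rw [hrun]
          apply ih
          intro i hi hcj
          have := h (i + 1) (by simpa using hi) (by simpa using hcj)
          simp at this ⊢
          omega
      · by_cases hc3 : c = ')'
        · subst hc3
          have h0 := h 0 (by simp) (by simp)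
          simp at h0
          rcases stack.eq_nil_or_concat with rfl | ⟨L, b, hLb⟩
          · simp at h0
          · rw [List.concat_eq_append] at hLb
            subst hLb
            have hd : directionsA.get? ')' = none := by decide
            have hrun : runA (')' :: cs) (grid, L ++ [b], p)
                = runA cs ((stepDir ')' grid p).1, L, b) := by
              simp [runA, stepCtl, stepDir, hd, PySem.List.pop?_last]
            rw [hrun]
            apply ih
            intro i hi hcj
            have := h (i + 1) (by simpa using hi) (by simpa using hcj)
            simp at this ⊢
            omega
        · have hrun : runA (c :: cs) (grid, stack, p)
              = runA cs ((stepDir c grid p).1, stack, (stepDir c grid p).2) := by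
            simp [runA, stepCtl, hc1, hc2, hc3]
          rw [hrun]
          apply ih
          intro i hi hcj
          have := h (i + 1) (by simpa using hi) (by simpa using hcj)
          simp [hc1, hc3] at this ⊢
          omega

-- the group lemma: a parseAlt level simulates runA with one more stack entry
theorem runA_parseAlt : ∀ (n : Nat) (cs : List Char), cs.length ≤ n →
    ∀ (f : Nat), 2 * cs.length + 1 ≤ f →
    ∀ (start p : Int × Int) (grid : PySem.Dict (Int × Int) String) (outer : List (Int × Int)),
    (∃ g, parseAlt f cs start p grid = ([], g) ∧
      ∃ s' p', runA cs (grid, outer ++ [start], p) = some (g, s', p')) ∨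
    (∃ rest g, parseAlt f cs start p grid = (rest, g) ∧ rest.length < cs.length ∧
      runA cs (grid, outer ++ [start], p) = runA rest (g, outer, start)) := by
  intro n
  induction n with
  | zero =>
    intro cs hlen f hf start p grid outer
    have : cs = [] := List.length_eq_zero_iff.mp (Nat.le_zero.mp hlen)
    subst this
    obtain ⟨f', rfl⟩ : ∃ f', f = f' + 1 := ⟨f - 1, by omega⟩
    exact Or.inl ⟨grid, by simp [parseAlt], outer ++ [start], p, rfl⟩
  | succ n ih =>
    intro cs hlen f hf start p grid outer
    match cs with
    | [] =>
      obtain ⟨f', rfl⟩ : ∃ f', f = f' + 1 := ⟨f - 1, by omega⟩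
      exact Or.inl ⟨grid, by simp [parseAlt], outer ++ [start], p, rfl⟩
    | c :: cs =>
      obtain ⟨f', rfl⟩ : ∃ f', f = f' + 1 := ⟨f - 1, by omega⟩
      have hf' : 2 * cs.length + 1 ≤ f' := by simp [List.length_cons] at hf; omega
      have hlen' : cs.length ≤ n := by simp [List.length_cons] at hlen; omega
      by_cases hc1 : c = '('
      · subst hc1
        have hd : directionsA.get? '(' = none := by decide
        have hrun : runA ('(' :: cs) (grid, outer ++ [start], p)
            = runA cs (grid.insert p ".", (outer ++ [start]) ++ [p], p) := by
          simp [runA, stepCtl, stepDir, hd]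
        have hpa : parseAlt (f' + 1) ('(' :: cs) start p grid
            = (match parseAlt f' cs p p (grid.insert p ".") with
               | (rest, g) => parseAlt f' rest start p g) := by
          simp [parseAlt, hd]
        rcases ih cs hlen' f' hf' p p (grid.insert p ".") (outer ++ [start]) with
          ⟨g, hg, s', p'', hr⟩ | ⟨rest, g, hg, hlt, hr⟩
        · obtain ⟨f'', rfl⟩ : ∃ f'', f' = f'' + 1 := ⟨f' - 1, by omega⟩
          refine Or.inl ⟨g, ?_, s', p'', ?_⟩
          · rw [hpa, hg]; simp [parseAlt]
          · rw [hrun]; exact hr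
        · rcases ih rest (by omega) f' (by omega) start p g outer with
            ⟨g2, hg2, s2, p2, hr2⟩ | ⟨rest2, g2, hg2, hlt2, hr2⟩
          · refine Or.inl ⟨g2, ?_, s2, p2, ?_⟩
            · rw [hpa, hg]; exact hg2
            · rw [hrun, hr]; exact hr2
          · refine Or.inr ⟨rest2, g2, ?_, by simp [List.length_cons]; omega, ?_⟩
            · rw [hpa, hg]; exact hg2
            · rw [hrun, hr]; exact hr2
      · by_cases hc2 : c = '|'
        · subst hc2
          have hd : directionsA.get? '|' = none := by decide
          have hrun : runA ('|' :: cs) (grid, outer ++ [start], p)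
              = runA cs (grid.insert p ".", outer ++ [start], start) := by
            simp [runA, stepCtl, stepDir, hd, pysem]
          have hpa : parseAlt (f' + 1) ('|' :: cs) start p grid
              = parseAlt f' cs start start (grid.insert p ".") := by
            simp [parseAlt, hd]
          rcases ih cs hlen' f' hf' start start (grid.insert p ".") outer with
            ⟨g, hg, s', p'', hr⟩ | ⟨rest, g, hg, hlt, hr⟩
          · exact Or.inl ⟨g, by rw [hpa]; exact hg, s', p'', by rw [hrun]; exact hr⟩
          · exact Or.inr ⟨rest, g, by rw [hpa]; exact hg,
              by simp [List.length_cons]; omega, by rw [hrun]; exact hr⟩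
        · by_cases hc3 : c = ')'
          · subst hc3
            have hd : directionsA.get? ')' = none := by decide
            have hrun : runA (')' :: cs) (grid, outer ++ [start], p)
                = runA cs (grid.insert p ".", outer, start) := by
              simp [runA, stepCtl, stepDir, hd, PySem.List.pop?_last]
            have hpa : parseAlt (f' + 1) (')' :: cs) start p grid
                = (cs, grid.insert p ".") := by
              simp [parseAlt, hd]
            exact Or.inr ⟨cs, grid.insert p ".", hpa, by simp, hrun⟩
          · rcases hd : directionsA.get? c with _ | ⟨dx, dy, door⟩
            · have hrun : runA (c :: cs) (grid, outer ++ [start], p)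
                  = runA cs (grid.insert p ".", outer ++ [start], p) := by
                simp [runA, stepCtl, stepDir, hd, hc1, hc2, hc3]
              have hpa : parseAlt (f' + 1) (c :: cs) start p grid
                  = parseAlt f' cs start p (grid.insert p ".") := by
                simp [parseAlt, hd, hc1, hc2, hc3]
              rcases ih cs hlen' f' hf' start p (grid.insert p ".") outer with
                ⟨g, hg, s', p'', hr⟩ | ⟨rest, g, hg, hlt, hr⟩
              · exact Or.inl ⟨g, by rw [hpa]; exact hg, s', p'', by rw [hrun]; exact hr⟩
              · exact Or.inr ⟨rest, g, by rw [hpa]; exact hg,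
                  by simp [List.length_cons]; omega, by rw [hrun]; exact hr⟩
            · have hrun : runA (c :: cs) (grid, outer ++ [start], p)
                  = runA cs ((grid.insert p ".").insert
                      (p.1 + PySem.Int.floordiv dx 2, p.2 + PySem.Int.floordiv dy 2) door,
                      outer ++ [start], (p.1 + dx, p.2 + dy)) := by
                simp [runA, stepCtl, stepDir, hd, hc1, hc2, hc3]
              have hpa : parseAlt (f' + 1) (c :: cs) start p grid
                  = parseAlt f' cs start (p.1 + dx, p.2 + dy)
                      ((grid.insert p ".").insert
                        (p.1 + PySem.Int.floordiv dx 2, p.2 + PySem.Int.floordiv dy 2) door) := by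
                simp [parseAlt, hd]
              rcases ih cs hlen' f' hf' start (p.1 + dx, p.2 + dy)
                  ((grid.insert p ".").insert
                    (p.1 + PySem.Int.floordiv dx 2, p.2 + PySem.Int.floordiv dy 2) door) outer with
                ⟨g, hg, s', p'', hr⟩ | ⟨rest, g, hg, hlt, hr⟩
              · exact Or.inl ⟨g, by rw [hpa]; exact hg, s', p'', by rw [hrun]; exact hr⟩
              · exact Or.inr ⟨rest, g, by rw [hpa]; exact hg,
                  by simp [List.length_cons]; omega, by rw [hrun]; exact hr⟩

-- top level: with an empty stack, runA's grid is parseAlt's grid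
theorem runA_top : ∀ (n : Nat) (cs : List Char), cs.length ≤ n →
    ∀ (f : Nat), 2 * cs.length + 1 ≤ f →
    ∀ (s0 p : Int × Int) (grid g : PySem.Dict (Int × Int) String)
      (s' : List (Int × Int)) (p' : Int × Int),
    runA cs (grid, [], p) = some (g, s', p') →
    parseAlt f cs s0 p grid = ([], g) := by
  intro n
  induction n with
  | zero =>
    intro cs hlen f hf s0 p grid g s' p' hr
    have : cs = [] := List.length_eq_zero_iff.mp (Nat.le_zero.mp hlen)
    subst this
    obtain ⟨f', rfl⟩ : ∃ f', f = f' + 1 := ⟨f - 1, by omega⟩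
    simp [runA] at hr
    simp [parseAlt, hr.1]
  | succ n ih =>
    intro cs hlen f hf s0 p grid g s' p' hr
    match cs with
    | [] =>
      obtain ⟨f', rfl⟩ : ∃ f', f = f' + 1 := ⟨f - 1, by omega⟩
      simp [runA] at hr
      simp [parseAlt, hr.1]
    | c :: cs =>
      obtain ⟨f', rfl⟩ : ∃ f', f = f' + 1 := ⟨f - 1, by omega⟩
      have hf' : 2 * cs.length + 1 ≤ f' := by simp [List.length_cons] at hf; omega
      have hlen' : cs.length ≤ n := by simp [List.length_cons] at hlen; omega
      by_cases hc1 : c = '('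
      · subst hc1
        have hd : directionsA.get? '(' = none := by decide
        have hrun : runA ('(' :: cs) (grid, [], p)
            = runA cs (grid.insert p ".", [p], p) := by
          simp [runA, stepCtl, stepDir, hd]
        have hpa : parseAlt (f' + 1) ('(' :: cs) s0 p grid
            = (match parseAlt f' cs p p (grid.insert p ".") with
               | (rest, g) => parseAlt f' rest s0 p g) := by
          simp [parseAlt, hd]
        rw [hrun] at hr
        rcases runA_parseAlt n cs hlen' f' hf' p p (grid.insert p ".") [] with
          ⟨g0, hg0, s'', p'', hr0⟩ | ⟨rest, g0, hg0, hlt, hr0⟩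
        · simp only [List.nil_append] at hr0
          rw [hr0] at hr
          obtain ⟨rfl, rfl, rfl⟩ : g0 = g ∧ s'' = s' ∧ p'' = p' := by
            simpa using hr
          obtain ⟨f'', rfl⟩ : ∃ f'', f' = f'' + 1 := ⟨f' - 1, by omega⟩
          rw [hpa, hg0]
          simp [parseAlt]
        · simp only [List.nil_append] at hr0
          rw [hr0] at hr
          have := ih rest (by omega) f' (by omega) s0 p g0 g s' p' hr
          rw [hpa, hg0]
          exact this
      · by_cases hc2 : c = '|'
        · subst hc2
          have hd : directionsA.get? '|' = none := by decide
          exfalso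
          have : runA ('|' :: cs) (grid, [], p) = none := by
            simp [runA, stepCtl, stepDir, hd, PySem.List.pyGet?]
          rw [this] at hr
          simp at hr
        · by_cases hc3 : c = ')'
          · subst hc3
            have hd : directionsA.get? ')' = none := by decide
            exfalso
            have : runA (')' :: cs) (grid, [], p) = none := by
              simp [runA, stepCtl, stepDir, hd, PySem.List.pop?]
            rw [this] at hr
            simp at hr
          · rcases hd : directionsA.get? c with _ | ⟨dx, dy, door⟩
            · have hrun : runA (c :: cs) (grid, [], p)
                  = runA cs (grid.insert p ".", [], p) := by
                simp [runA, stepCtl, stepDir, hd, hc1, hc2, hc3]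
              rw [hrun] at hr
              have := ih cs hlen' f' hf' s0 p (grid.insert p ".") g s' p' hr
              have hpa : parseAlt (f' + 1) (c :: cs) s0 p grid
                  = parseAlt f' cs s0 p (grid.insert p ".") := by
                simp [parseAlt, hd, hc1, hc2, hc3]
              rw [hpa]; exact this
            · have hrun : runA (c :: cs) (grid, [], p)
                  = runA cs ((grid.insert p ".").insert
                      (p.1 + PySem.Int.floordiv dx 2, p.2 + PySem.Int.floordiv dy 2) door,
                      [], (p.1 + dx, p.2 + dy)) := by
                simp [runA, stepCtl, stepDir, hd, hc1, hc2, hc3]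
              rw [hrun] at hr
              have := ih cs hlen' f' hf' s0 (p.1 + dx, p.2 + dy)
                ((grid.insert p ".").insert
                  (p.1 + PySem.Int.floordiv dx 2, p.2 + PySem.Int.floordiv dy 2) door) g s' p' hr
              have hpa : parseAlt (f' + 1) (c :: cs) s0 p grid
                  = parseAlt f' cs s0 (p.1 + dx, p.2 + dy)
                      ((grid.insert p ".").insert
                        (p.1 + PySem.Int.floordiv dx 2, p.2 + PySem.Int.floordiv dy 2) door) := by
                simp [parseAlt, hd]
              rw [hpa]; exact this

-- ===== VERDICT (by name: the statement is the Claim_ definition above) =====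
theorem search_spec : Claim_equal_search := by
  intro regexp _hdom hpre
  unfold Spec_search search search_alt
  obtain ⟨⟨g, s', p'⟩, hst⟩ := runA_total regexp.toList [] PySem.Dict.empty (0, 0)
    (by intro i hi hc; simpa using hpre i hi hc)
  have htop := runA_top regexp.toList.length regexp.toList le_rfl
    (2 * regexp.toList.length + 1) le_rfl (0, 0) (0, 0) PySem.Dict.empty g s' p' hst
  rw [hst]
  show _ = (parseAlt (2 * regexp.toList.length + 1) regexp.toList (0, 0) (0, 0) PySem.Dict.empty).2.items.map (fun kv => (kv.1.1, kv.1.2, kv.2))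
  rw [htop]
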